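-- pv_equiv track=rewrite | github.com/ivgnk/Pyton-Codewars-Leetcode | Leetcode/1030_easy_Matrix Cells in Distance Order.py | allCellsDistOrder3
-- ===== SOURCE A (Python) =====
-- def allCellsDistOrder3(rows, cols, rCenter, cCenter):
--     """
--     :type rows: int
--     :type cols: int
--     :type rCenter: int
--     :type cCenter: int
--     :rtype: List[List[int]]
--     """
--     lst=list()
--     for i in range(rows):
--         for j in range(cols):
--             r = abs(i - rCenter) + abs(j - cCenter)
--             lst.append([r, [i, j]])
--     lst=sorted(lst)
--     return [lst[i][1] for i in range(len(lst))]
-- ===== SOURCE B (Python) =====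
-- def allCellsDistOrder3(rows, cols, rCenter, cCenter):
--     """Bucket cells by Manhattan distance in one row-major pass, then emit
--     buckets by increasing distance: no sort of the R*C cells is needed
--     (only the at most R+C-1 distinct distances are sorted)."""
--     buckets = {}
--     for i in range(rows):
--         for j in range(cols):
--             d = abs(i - rCenter) + abs(j - cCenter)
--             buckets.setdefault(d, []).append([i, j])
--     out = []
--     for d in sorted(buckets):
--         out += buckets[d]
--     return out
-- ===== Notes on version B (the rewrite author's own statement) =====
-- stated objective: faster
-- what changed: Instead of building all R*C [dist,[i,j]] records and comparison-sorting them, B buckets cells by Manhattan distance in one row-major pass into a dict and concatenates the buckets in increasing-distance order (row-major filling preserves the lexicographic tie order), so only the at most R+C-1 distinct distances are sorted.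
import Mathlib
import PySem

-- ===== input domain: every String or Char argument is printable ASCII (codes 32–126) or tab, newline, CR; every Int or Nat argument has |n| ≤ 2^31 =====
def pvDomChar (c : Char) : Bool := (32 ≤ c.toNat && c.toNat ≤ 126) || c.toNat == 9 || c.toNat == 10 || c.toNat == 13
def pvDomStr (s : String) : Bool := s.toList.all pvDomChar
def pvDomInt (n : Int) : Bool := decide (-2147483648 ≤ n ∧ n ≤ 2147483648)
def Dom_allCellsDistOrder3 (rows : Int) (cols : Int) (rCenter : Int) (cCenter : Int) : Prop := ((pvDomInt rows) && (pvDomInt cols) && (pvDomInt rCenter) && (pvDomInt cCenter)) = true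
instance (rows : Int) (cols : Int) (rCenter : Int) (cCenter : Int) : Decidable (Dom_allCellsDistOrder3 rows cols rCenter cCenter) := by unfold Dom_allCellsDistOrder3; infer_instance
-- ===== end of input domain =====

-- B replaces A's full sort of all R*C records by one row-major bucketing pass over the cells
-- plus a sort of the distinct distances only (objective: faster).

-- ===== PORT A =====
-- Python's lst element is [r, [i, j]] with r, i, j ints; comparing two such values is exactly
-- the lexicographic comparison of the triples (r, i, j), so the element is represented as the
-- triple (r, i, j) and `sorted(lst)` becomes a sort under the lexicographic key (exact here,
-- since the inner lists always have length 2).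
def allCellsDistOrder3 (rows : Int) (cols : Int) (rCenter : Int) (cCenter : Int) : List (List Int) :=
  let lst : List (Int × Int × Int) :=
    (PySem.List.pyRange 0 rows).foldl (fun lst i =>
      (PySem.List.pyRange 0 cols).foldl (fun lst j =>
        lst ++ [(|i - rCenter| + |j - cCenter|, i, j)]) lst) []
  let lst := PySem.List.sorted lst (fun x => toLex (x.1, toLex (x.2.1, x.2.2)))
  (PySem.List.pyRange 0 (PySem.List.len lst)).map
    (fun k => [(PySem.List.pyGetD lst k (0, 0, 0)).2.1, (PySem.List.pyGetD lst k (0, 0, 0)).2.2])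

-- ===== PORT B =====
-- buckets.setdefault(d, []).append([i, j]) is exactly Dict.modify d [] (· ++ [[i, j]]);
-- buckets[d] in the output loop is ported as getD d [] (exact: d is drawn from buckets' keys).
def allCellsDistOrder3_alt (rows : Int) (cols : Int) (rCenter : Int) (cCenter : Int) : List (List Int) :=
  let buckets : PySem.Dict Int (List (List Int)) :=
    (PySem.List.pyRange 0 rows).foldl (fun b i =>
      (PySem.List.pyRange 0 cols).foldl (fun b j =>
        b.modify (|i - rCenter| + |j - cCenter|) [] (· ++ [[i, j]])) b) PySem.Dict.empty
  (PySem.List.sorted buckets.keys (fun x => x)).foldl (fun out d => out ++ buckets.getD d []) []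

-- ===== PRECONDITION & SPEC =====
def Spec_allCellsDistOrder3 (rows : Int) (cols : Int) (rCenter : Int) (cCenter : Int) (out : List (List Int)) : Prop := out = allCellsDistOrder3_alt rows cols rCenter cCenter
instance (rows : Int) (cols : Int) (rCenter : Int) (cCenter : Int) (out : List (List Int)) : Decidable (Spec_allCellsDistOrder3 rows cols rCenter cCenter out) := by unfold Spec_allCellsDistOrder3; infer_instance

-- ===== CLAIM (what is proved, stated in full; the proofs are below) =====
def Claim_equal_allCellsDistOrder3 : Prop := ∀ (rows : Int) (cols : Int) (rCenter : Int) (cCenter : Int), Dom_allCellsDistOrder3 rows cols rCenter cCenter → Spec_allCellsDistOrder3 rows cols rCenter cCenter (allCellsDistOrder3 rows cols rCenter cCenter)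

-- ===== LEMMAS AND PROOFS =====

-- the row-major list of (distance, i, j) triples both programs traverse
def pvCells (rows cols rCenter cCenter : Int) : List (Int × Int × Int) :=
  (PySem.List.pyRange 0 rows).flatMap (fun i =>
    (PySem.List.pyRange 0 cols).map (fun j => (|i - rCenter| + |j - cCenter|, i, j)))

-- the lexicographic key Python's comparison of [r, [i, j]] records realises
def pvKey (x : Int × Int × Int) : Lex (Int × Lex (Int × Int)) := toLex (x.1, toLex (x.2.1, x.2.2))

def pvOut (x : Int × Int × Int) : List Int := [x.2.1, x.2.2]

-- the sorted list of the distinct distances, as B computes it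
def pvKs (rows cols rCenter cCenter : Int) : List Int :=
  PySem.List.sorted (PySem.Set.ofList ((pvCells rows cols rCenter cCenter).map (·.1))) (fun x => x)

lemma pv_map_index (xs : List (Int × Int × Int)) :
    (PySem.List.pyRange 0 (PySem.List.len xs)).map
      (fun k => [(PySem.List.pyGetD xs k (0, 0, 0)).2.1, (PySem.List.pyGetD xs k (0, 0, 0)).2.2])
    = xs.map pvOut := by
  conv_rhs => rw [← PySem.List.map_pyGetD_pyRange_zero xs ((0 : Int), (0 : Int), (0 : Int))]
  rw [List.map_map]
  rfl

lemma pv_portA (rows cols rCenter cCenter : Int) :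
    allCellsDistOrder3 rows cols rCenter cCenter
      = (PySem.List.sorted (pvCells rows cols rCenter cCenter) pvKey).map pvOut := by
  unfold allCellsDistOrder3 pvCells
  simp only [PySem.List.foldl_append_singleton_eq_map, PySem.List.foldl_append_eq_flatMap,
    List.nil_append]
  exact pv_map_index _

lemma pv_portB (rows cols rCenter cCenter : Int) :
    allCellsDistOrder3_alt rows cols rCenter cCenter
      = (pvKs rows cols rCenter cCenter).flatMap (fun d =>
          ((pvCells rows cols rCenter cCenter).filter (fun x => x.1 == d)).map pvOut) := by
  unfold allCellsDistOrder3_alt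
  have hfold :
      (PySem.List.pyRange 0 rows).foldl (fun b i =>
        (PySem.List.pyRange 0 cols).foldl (fun b j =>
          b.modify (|i - rCenter| + |j - cCenter|) [] (· ++ [[i, j]])) b)
        (PySem.Dict.empty : PySem.Dict Int (List (List Int)))
      = ((pvCells rows cols rCenter cCenter).map (fun x => (x.1, pvOut x))).foldl
          (fun d p => d.modify p.1 [] (· ++ [p.2])) PySem.Dict.empty := by
    simp only [pvCells, pvOut, List.map_flatMap, List.map_map, List.foldl_flatMap,
      List.foldl_map, Function.comp]
  rw [hfold]
  have hkeys :
      (((pvCells rows cols rCenter cCenter).map (fun x => (x.1, pvOut x))).foldl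
          (fun d p => d.modify p.1 [] (· ++ [p.2])) PySem.Dict.empty).keys
      = PySem.Set.ofList ((pvCells rows cols rCenter cCenter).map (·.1)) := by
    rw [PySem.Dict.keys_foldl_modify_key _ Prod.fst [] (fun _ p v => v ++ [p.2])]
    simp only [PySem.Dict.keys_empty, List.map_map]
    rfl
  simp only [hkeys, PySem.List.foldl_append_eq_flatMap, List.nil_append, pvKs,
    PySem.Dict.getD_foldl_modify_append, PySem.Dict.getD_empty, List.filter_map,
    List.map_map, Function.comp_def]

-- generic: flatMapping the key-buckets over a duplicate-free key list covering xs permutes xs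
lemma pv_perm_flatMap_filter {α : Type} (key : α → Int) (ks : List Int) (xs : List α)
    (hnd : ks.Nodup) (hall : ∀ x ∈ xs, key x ∈ ks) :
    (ks.flatMap (fun d => xs.filter (fun x => key x == d))).Perm xs := by
  induction ks generalizing xs with
  | nil =>
    cases xs with
    | nil => simp
    | cons a t => exact absurd (hall a (List.mem_cons_self)) (by simp)
  | cons k ks ih =>
    rw [List.flatMap_cons]
    have hndk : k ∉ ks := (List.nodup_cons.1 hnd).1
    have hrw : ks.flatMap (fun d => xs.filter (fun x => key x == d))
        = ks.flatMap (fun d => (xs.filter (fun x => !(key x == k))).filter (fun x => key x == d)) := by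
      apply List.flatMap_congr
      intro d hd
      rw [List.filter_filter]
      apply List.filter_congr
      intro x _
      by_cases h : key x = d
      · have hdk : d ≠ k := fun he => hndk (he ▸ hd)
        simp [h, hdk]
      · simp [h]
    rw [hrw]
    have hall' : ∀ x ∈ xs.filter (fun x => !(key x == k)), key x ∈ ks := by
      intro x hx
      rcases List.mem_filter.1 hx with ⟨hm, hk⟩
      rcases List.mem_cons.1 (hall x hm) with he | hm2
      · simp [he] at hk
      · exact hm2
    refine List.Perm.trans ?_ (List.filter_append_perm (fun x => key x == k) xs)
    exact List.Perm.append_left _ (ih _ (List.nodup_cons.1 hnd).2 hall')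

-- the row-major cell list is strictly increasing in (i, j)
lemma pv_cells_pairwise (rows cols rCenter cCenter : Int) :
    (pvCells rows cols rCenter cCenter).Pairwise
      (fun a b => a.2.1 < b.2.1 ∨ (a.2.1 = b.2.1 ∧ a.2.2 < b.2.2)) := by
  have hpr : ∀ n : Int, (PySem.List.pyRange 0 n).Pairwise (· < ·) := by
    intro n
    by_cases h : 0 ≤ n
    · rw [show n = ((n.toNat : Nat) : Int) from (Int.toNat_of_nonneg h).symm,
        PySem.List.pyRange_zero_natCast]
      exact List.pairwise_lt_range.map _ (fun a b hab => by exact_mod_cast hab)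
    · have : PySem.List.pyRange 0 n = [] := by
        apply List.eq_nil_iff_forall_not_mem.2
        intro x hx
        rcases PySem.List.mem_pyRange_one.1 hx with ⟨h1, h2⟩
        omega
      simp [this]
  unfold pvCells
  rw [List.flatMap_def, List.pairwise_flatten]
  constructor
  · intro l hl
    rcases List.mem_map.1 hl with ⟨i, _, rfl⟩
    rw [List.pairwise_map]
    exact (hpr cols).imp (fun hab => Or.inr ⟨rfl, hab⟩)
  · rw [List.pairwise_map]
    apply (hpr rows).imp_of_mem
    intro i1 i2 _ _ h12 x hx y hy
    rcases List.mem_map.1 hx with ⟨j1, _, rfl⟩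
    rcases List.mem_map.1 hy with ⟨j2, _, rfl⟩
    exact Or.inl h12

lemma pv_sorted_cells (rows cols rCenter cCenter : Int) :
    PySem.List.sorted (pvCells rows cols rCenter cCenter) pvKey
      = (pvKs rows cols rCenter cCenter).flatMap (fun d =>
          (pvCells rows cols rCenter cCenter).filter (fun x => x.1 == d)) := by
  have hksnd : (pvKs rows cols rCenter cCenter).Nodup :=
    (PySem.List.sorted_perm _ _ _).nodup_iff.2 (PySem.Set.nodup_ofList _)
  have hkslt : (pvKs rows cols rCenter cCenter).Pairwise (· < ·) :=
    PySem.List.sorted_ofList_pairwise_lt _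
  apply PySem.List.sorted_eq_of_perm_of_pairwise_lt
  · exact pv_perm_flatMap_filter (fun (x : Int × Int × Int) => x.1) _ _ hksnd
      (fun x hx => (PySem.List.mem_sorted _ _ _ _).2 ((PySem.Set.mem_ofList _ _).2
        (List.mem_map_of_mem hx)))
  · rw [List.flatMap_def, List.pairwise_flatten]
    constructor
    · intro l hl
      rcases List.mem_map.1 hl with ⟨d, _, rfl⟩
      apply List.Pairwise.imp_of_mem ?_ ((pv_cells_pairwise rows cols rCenter cCenter).filter _)
      intro a b ha hb hab
      have ha1 : a.1 = d := by simpa using (List.mem_filter.1 ha).2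
      have hb1 : b.1 = d := by simpa using (List.mem_filter.1 hb).2
      unfold pvKey
      rw [Prod.Lex.toLex_lt_toLex]
      refine Or.inr ⟨by rw [ha1, hb1], ?_⟩
      rw [Prod.Lex.toLex_lt_toLex]
      exact hab
    · rw [List.pairwise_map]
      apply hkslt.imp_of_mem
      intro d1 d2 _ _ h12 x hx y hy
      have hx1 : x.1 = d1 := by simpa using (List.mem_filter.1 hx).2
      have hy1 : y.1 = d2 := by simpa using (List.mem_filter.1 hy).2
      unfold pvKey
      rw [Prod.Lex.toLex_lt_toLex]
      exact Or.inl (by rw [hx1, hy1]; exact h12)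

-- ===== VERDICT (by name: the statement is the Claim_ definition above) =====
theorem allCellsDistOrder3_spec : Claim_equal_allCellsDistOrder3 := by
  intro rows cols rCenter cCenter _
  unfold Spec_allCellsDistOrder3
  rw [pv_portA, pv_portB, pv_sorted_cells, List.map_flatMap]
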